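-- pv_equiv track=rewrite | github.com/tboudreaux/CoolDwarf | src/CoolDwarf/utils/interp/interpolate.py | find_closest_values
-- ===== SOURCE A (Python) =====
-- def find_closest_values(numList, targetValue):
--     if targetValue < min(numList) or targetValue > max(numList):
--         raise ValueError("The target value is outside the range of the list.")
--
--     sortedList = sorted(numList)
--
--     if targetValue in sortedList:
--         return targetValue, None
--
--     closestLarger = None
--     closestSmaller = None
--
--     for num in sortedList:
--         if num > targetValue:
--             closestLarger = num
--             break
--         closestSmaller = num
--
--     return closestLarger, closestSmaller
-- ===== SOURCE B (Python) =====
-- def find_closest_values(numList, targetValue):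
--     found = False
--     lo = hi = None
--     smaller = larger = None
--     for num in numList:
--         if lo is None or num < lo:
--             lo = num
--         if hi is None or num > hi:
--             hi = num
--         if num == targetValue:
--             found = True
--         elif num < targetValue:
--             if smaller is None or num > smaller:
--                 smaller = num
--         else:
--             if larger is None or num < larger:
--                 larger = num
--     if lo is None or targetValue < lo or targetValue > hi:
--         raise ValueError("The target value is outside the range of the list.")
--     if found:
--         return targetValue, None
--     return larger, smaller
-- ===== Notes on version B (the rewrite author's own statement) =====
-- stated objective: alternative
-- what changed: A sorts the list and then scans the sorted copy (plus separate min/max/membership passes); B makes one linear pass tracking min, max, best-smaller, best-larger and membership, with no sort.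
import Mathlib
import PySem

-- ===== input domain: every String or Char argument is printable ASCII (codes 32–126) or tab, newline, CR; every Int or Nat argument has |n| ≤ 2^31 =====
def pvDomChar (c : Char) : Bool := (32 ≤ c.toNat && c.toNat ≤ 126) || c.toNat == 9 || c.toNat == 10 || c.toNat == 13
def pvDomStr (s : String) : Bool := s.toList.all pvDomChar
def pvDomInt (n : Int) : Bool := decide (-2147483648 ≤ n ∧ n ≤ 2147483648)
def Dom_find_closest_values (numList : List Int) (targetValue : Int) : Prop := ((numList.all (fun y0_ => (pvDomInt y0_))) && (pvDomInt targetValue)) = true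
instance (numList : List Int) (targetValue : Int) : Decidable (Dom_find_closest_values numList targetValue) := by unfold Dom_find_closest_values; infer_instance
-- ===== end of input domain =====

-- B replaces A's sort-then-scan by one linear pass tracking min, max, best-smaller,
-- best-larger and membership together, with no sort. Equivalence is about the return
-- value; both Pythons raise ValueError exactly on the inputs Pre_ excludes.

-- ===== PORT A =====
-- the for-loop with break: carries closestSmaller, returns (closestLarger, closestSmaller)
def pvALoop (t : Int) : List Int → Option Int → Option Int × Option Int
  | [], cs => (none, cs)
  | n :: rest, cs => if n > t then (some n, cs) else pvALoop t rest (some n)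

-- the leading range test raises ValueError; those inputs are excluded by Pre_ below,
-- so the port starts at `sortedList = sorted(numList)`.
def find_closest_values (numList : List Int) (targetValue : Int) : List (Option Int) :=
  let sortedList := PySem.List.sorted numList (fun x => x) false
  if targetValue ∈ sortedList then
    [some targetValue, none]
  else
    let r := pvALoop targetValue sortedList none
    [r.1, r.2]

-- ===== PORT B =====
-- state: (lo, hi, smaller, larger, found)
def pvBStep (t : Int) (st : Option Int × Option Int × Option Int × Option Int × Bool)
    (num : Int) : Option Int × Option Int × Option Int × Option Int × Bool :=
  let (lo, hi, sm, lg, f) := st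
  let lo := match lo with
    | none => some num
    | some m => if num < m then some num else some m
  let hi := match hi with
    | none => some num
    | some m => if num > m then some num else some m
  if num == t then (lo, hi, sm, lg, true)
  else if num < t then
    (lo, hi,
      (match sm with
        | none => some num
        | some m => if num > m then some num else some m), lg, f)
  else
    (lo, hi, sm,
      (match lg with
        | none => some num
        | some m => if num < m then some num else some m), f)

-- the post-loop range test raises ValueError on exactly the inputs Pre_ excludes,
-- so the port returns the final expressions directly.
def find_closest_values_alt (numList : List Int) (targetValue : Int) : List (Option Int) :=
  let st := numList.foldl (pvBStep targetValue) (none, none, none, none, false)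
  if st.2.2.2.2 then [some targetValue, none]
  else [st.2.2.2.1, st.2.2.1]

-- ===== PRECONDITION & SPEC =====
-- Pre_ excludes exactly the inputs where A (and B) raise ValueError: the empty list
-- and a target outside [min(numList), max(numList)].
def Pre_find_closest_values (numList : List Int) (targetValue : Int) : Prop :=
  (∃ a ∈ numList, a ≤ targetValue) ∧ (∃ b ∈ numList, targetValue ≤ b)
instance (numList : List Int) (targetValue : Int) : Decidable (Pre_find_closest_values numList targetValue) := by unfold Pre_find_closest_values; infer_instance

def pvWitness_find_closest_values : List Int × Int := ([3, 1, 7], 4)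

def Spec_find_closest_values (numList : List Int) (targetValue : Int) (out : List (Option Int)) : Prop := out = find_closest_values_alt numList targetValue
instance (numList : List Int) (targetValue : Int) (out : List (Option Int)) : Decidable (Spec_find_closest_values numList targetValue out) := by unfold Spec_find_closest_values; infer_instance

-- ===== CLAIM (what is proved, stated in full; the proofs are below) =====
def Claim_equal_find_closest_values : Prop := ∀ (numList : List Int) (targetValue : Int), Dom_find_closest_values numList targetValue → Pre_find_closest_values numList targetValue → Spec_find_closest_values numList targetValue (find_closest_values numList targetValue)

-- ===== LEMMAS AND PROOFS =====

-- option-level min/max, and running extrema of a list / of a filtered list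
def pvOmin : Option Int → Option Int → Option Int
  | none, y => y
  | some a, none => some a
  | some a, some b => some (min a b)

def pvOmax : Option Int → Option Int → Option Int
  | none, y => y
  | some a, none => some a
  | some a, some b => some (max a b)

def pvMinO : List Int → Option Int
  | [] => none
  | x :: l => pvOmin (some x) (pvMinO l)

def pvMaxO : List Int → Option Int
  | [] => none
  | x :: l => pvOmax (some x) (pvMaxO l)

theorem pvOmin_none_right (x : Option Int) : pvOmin x none = x := by
  cases x <;> rfl

theorem pvOmax_none_right (x : Option Int) : pvOmax x none = x := by
  cases x <;> rfl

theorem pvOmin_assoc (x y z : Option Int) : pvOmin (pvOmin x y) z = pvOmin x (pvOmin y z) := by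
  cases x <;> cases y <;> cases z <;> simp [pvOmin, min_assoc]

theorem pvOmax_assoc (x y z : Option Int) : pvOmax (pvOmax x y) z = pvOmax x (pvOmax y z) := by
  cases x <;> cases y <;> cases z <;> simp [pvOmax, max_assoc]

theorem pvOmin_swap' (a b : Int) : pvOmin (some a) (some b) = pvOmin (some b) (some a) := by
  simp [pvOmin, min_comm]

theorem pvOmax_swap' (a b : Int) : pvOmax (some a) (some b) = pvOmax (some b) (some a) := by
  simp [pvOmax, max_comm]

theorem pvMinO_mem {l : List Int} {m : Int} (h : pvMinO l = some m) : m ∈ l := by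
  induction l with
  | nil => simp [pvMinO] at h
  | cons x l ih =>
    simp only [pvMinO] at h
    cases hml : pvMinO l with
    | none => rw [hml, pvOmin_none_right] at h; simp_all
    | some k =>
      rw [hml] at h
      simp [pvOmin] at h
      rcases le_total x k with hle | hle
      · rw [min_eq_left hle] at h; simp [h]
      · rw [min_eq_right hle] at h
        exact List.mem_cons_of_mem _ (ih (h ▸ hml))

theorem pvMaxO_mem {l : List Int} {m : Int} (h : pvMaxO l = some m) : m ∈ l := by
  induction l with
  | nil => simp [pvMaxO] at h
  | cons x l ih =>
    simp only [pvMaxO] at h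
    cases hml : pvMaxO l with
    | none => rw [hml, pvOmax_none_right] at h; simp_all
    | some k =>
      rw [hml] at h
      simp [pvOmax] at h
      rcases le_total x k with hle | hle
      · rw [max_eq_right hle] at h
        exact List.mem_cons_of_mem _ (ih (h ▸ hml))
      · rw [max_eq_left hle] at h; simp [h]

theorem pvMinO_perm {l l' : List Int} (h : l.Perm l') : pvMinO l = pvMinO l' := by
  induction h with
  | nil => rfl
  | cons x _ ih => simp [pvMinO, ih]
  | swap x y l => simp only [pvMinO, ← pvOmin_assoc]; rw [pvOmin_swap' y x]
  | trans _ _ ih1 ih2 => exact ih1.trans ih2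

theorem pvMaxO_perm {l l' : List Int} (h : l.Perm l') : pvMaxO l = pvMaxO l' := by
  induction h with
  | nil => rfl
  | cons x _ ih => simp [pvMaxO, ih]
  | swap x y l => simp only [pvMaxO, ← pvOmax_assoc]; rw [pvOmax_swap' y x]
  | trans _ _ ih1 ih2 => exact ih1.trans ih2

-- B's fold computes the running extrema / filtered extrema / membership
theorem pvBFold (t : Int) (l : List Int) (lo hi sm lg : Option Int) (f : Bool) :
    l.foldl (pvBStep t) (lo, hi, sm, lg, f) =
      (pvOmin lo (pvMinO l), pvOmax hi (pvMaxO l),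
       pvOmax sm (pvMaxO (l.filter (fun x => x < t))),
       pvOmin lg (pvMinO (l.filter (fun x => t < x))),
       f || decide (t ∈ l)) := by
  induction l generalizing lo hi sm lg f with
  | nil => simp [pvMinO, pvMaxO, pvOmin_none_right, pvOmax_none_right]
  | cons x l ih =>
    have hlo : (match lo with
        | none => some x
        | some m => if x < m then some x else some m) = pvOmin lo (some x) := by
      cases lo with
      | none => rfl
      | some m =>
        simp only [pvOmin]
        by_cases h : x < m
        · simp [h, min_eq_right h.le]
        · simp [h, min_eq_left (not_lt.mp h)]
    have hhi : (match hi with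
        | none => some x
        | some m => if x > m then some x else some m) = pvOmax hi (some x) := by
      cases hi with
      | none => rfl
      | some m =>
        simp only [pvOmax, gt_iff_lt]
        by_cases h : m < x
        · simp [h, max_eq_right h.le]
        · simp [h, max_eq_left (not_lt.mp h)]
    have hsm : (match sm with
        | none => some x
        | some m => if x > m then some x else some m) = pvOmax sm (some x) := by
      cases sm with
      | none => rfl
      | some m =>
        simp only [pvOmax, gt_iff_lt]
        by_cases h : m < x
        · simp [h, max_eq_right h.le]
        · simp [h, max_eq_left (not_lt.mp h)]
    have hlg : (match lg with
        | none => some x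
        | some m => if x < m then some x else some m) = pvOmin lg (some x) := by
      cases lg with
      | none => rfl
      | some m =>
        simp only [pvOmin]
        by_cases h : x < m
        · simp [h, min_eq_right h.le]
        · simp [h, min_eq_left (not_lt.mp h)]
    simp only [List.foldl_cons]
    by_cases hxt : x = t
    · subst hxt
      have : pvBStep x (lo, hi, sm, lg, f) x = (pvOmin lo (some x), pvOmax hi (some x), sm, lg, true) := by
        simp [pvBStep, hlo, hhi]
      rw [this, ih]
      simp [pvMinO, pvMaxO, pvOmin_assoc, pvOmax_assoc, List.filter]
    · by_cases hlt : x < t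
      · have : pvBStep t (lo, hi, sm, lg, f) x =
            (pvOmin lo (some x), pvOmax hi (some x), pvOmax sm (some x), lg, f) := by
          simp [pvBStep, hlo, hhi, hsm, hxt, hlt]
        rw [this, ih]
        have hnt : ¬ t < x := by omega
        simp [pvMinO, pvMaxO, pvOmin_assoc, pvOmax_assoc, List.filter, hlt, hnt, hxt,
          eq_comm (a := t) (b := x)]
      · have hgt : t < x := by omega
        have : pvBStep t (lo, hi, sm, lg, f) x =
            (pvOmin lo (some x), pvOmax hi (some x), sm, pvOmin lg (some x), f) := by
          simp [pvBStep, hlo, hhi, hlg, hxt, hlt]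
        rw [this, ih]
        simp [pvMinO, pvMaxO, pvOmin_assoc, pvOmax_assoc, List.filter, hlt, hgt, hxt,
          eq_comm (a := t) (b := x)]

-- A's break-loop on a sorted list with the target absent: larger = min of the >t part,
-- smaller = max of the <t part (falling back to the accumulator when that part is empty)
theorem pvALoop_sorted (t : Int) (s : List Int) (hpw : s.Pairwise (· ≤ ·)) (hnm : t ∉ s)
    (cs : Option Int) :
    pvALoop t s cs =
      (pvMinO (s.filter (fun x => t < x)),
       (pvMaxO (s.filter (fun x => x < t))).or cs) := by
  induction s generalizing cs with
  | nil => simp [pvALoop, List.filter, pvMinO, pvMaxO]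
  | cons n rest ih =>
    have hub : ∀ y ∈ rest, n ≤ y := (List.pairwise_cons.mp hpw).1
    have hpw' := (List.pairwise_cons.mp hpw).2
    have hne : n ≠ t := fun h => hnm (h ▸ List.mem_cons_self)
    have hnm' : t ∉ rest := fun h => hnm (List.mem_cons_of_mem _ h)
    by_cases hgt : n > t
    · have hfil : rest.filter (fun x => x < t) = [] := by
        rw [List.filter_eq_nil_iff]
        intro y hy
        have := hub y hy
        simp; omega
      have hn1 : ¬ n < t := by omega
      simp only [pvALoop, if_pos hgt, if_neg hn1, List.filter_cons, decide_eq_true_eq]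
      rw [hfil]
      simp only [pvMaxO, Option.none_or, pvMinO]
      cases hmf : pvMinO (rest.filter (fun x => t < x)) with
      | none => simp [pvOmin]
      | some m =>
        have hm : m ∈ rest := List.mem_of_mem_filter (pvMinO_mem hmf)
        have := hub m hm
        simp [pvOmin, min_eq_left this]
    · have hlt : n < t := by omega
      simp only [pvALoop, if_neg hgt, if_pos hlt, List.filter_cons,
        decide_eq_true_eq]
      rw [ih hpw' hnm' (some n)]
      simp only [pvMaxO]
      cases hk : pvMaxO (rest.filter (fun x => x < t)) with
      | none => simp [pvOmax]
      | some m =>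
        have hm : m ∈ rest := List.mem_of_mem_filter (pvMaxO_mem hk)
        have := hub m hm
        simp [pvOmax, max_eq_right this]

-- ===== VERDICT (by name: the statement is the Claim_ definition above) =====
theorem find_closest_values_spec : Claim_equal_find_closest_values := by
  intro l t _ _
  unfold Spec_find_closest_values
  unfold find_closest_values find_closest_values_alt
  have hperm : (PySem.List.sorted l (fun x => x) false).Perm l := PySem.List.sorted_perm l _ _
  have hmem : t ∈ PySem.List.sorted l (fun x => x) false ↔ t ∈ l := PySem.List.mem_sorted l (fun x => x) false t
  rw [pvBFold]
  by_cases hm : t ∈ l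
  · simp [hmem, hm]
  · have hpw : (PySem.List.sorted l (fun x => x) false).Pairwise (· ≤ ·) :=
      PySem.List.sorted_pairwise l (fun x => x)
    have hnm : t ∉ PySem.List.sorted l (fun x => x) false := fun h => hm (hmem.mp h)
    simp only [hmem, hm, if_false]
    rw [pvALoop_sorted t _ hpw hnm none]
    simp only [Option.or_none]
    have h1 : pvMinO ((PySem.List.sorted l (fun x => x) false).filter (fun x => t < x)) =
        pvMinO (l.filter (fun x => t < x)) := pvMinO_perm (hperm.filter _)
    have h2 : pvMaxO ((PySem.List.sorted l (fun x => x) false).filter (fun x => x < t)) =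
        pvMaxO (l.filter (fun x => x < t)) := pvMaxO_perm (hperm.filter _)
    simp [h1, h2, pvOmin, pvOmax]
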